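-- pv_equiv track=rewrite | github.com/AlexWUrobot/leetcode_python | Max Aggregate Temp Change.py | getMaxAggregateTemperatureChange
-- ===== SOURCE A (Python) =====
-- def getMaxAggregateTemperatureChange(tempChange):
--     n = len(tempChange)
--     prefixSums = [0] * n
--     suffixSums = [0] * n
--
--     # Compute prefix sums
--     prefixSums[0] = tempChange[0]
--     for i in range(1, n):
--         prefixSums[i] = prefixSums[i - 1] + tempChange[i]
--
--     # Compute suffix sums
--     suffixSums[n - 1] = tempChange[n - 1]
--     for i in range(n - 2, -1, -1):
--         suffixSums[i] = suffixSums[i + 1] + tempChange[i]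
--
--     # Find maximum aggregate temperature change
--     maxAggregateChange = float('-inf')
--     for i in range(n):
--         maxChange = max(prefixSums[i], suffixSums[i])
--         maxAggregateChange = max(maxAggregateChange, maxChange)
--
--     return maxAggregateChange
-- ===== SOURCE B (Python) =====
-- def getMaxAggregateTemperatureChange(tempChange):
--     # One pass, scalar state: suffixSum(i) = total - prefixSum(i-1), so the best
--     # suffix is total minus the minimum prefix sum taken over P(-1)=0..P(n-2).
--     total = tempChange[0]
--     maxPrefix = total
--     minPrev = 0
--     for x in tempChange[1:]:
--         if total < minPrev:
--             minPrev = total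
--         total += x
--         if total > maxPrefix:
--             maxPrefix = total
--     return max(maxPrefix, total - minPrev)
-- ===== Notes on version B (the rewrite author's own statement) =====
-- stated objective: faster
-- what changed: Replaces the two auxiliary prefix/suffix arrays and three index loops by a single forward pass over the elements keeping three scalars (running total, max prefix sum, min of earlier prefix sums), using suffixSum(i) = total - prefixSum(i-1).
import Mathlib
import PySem

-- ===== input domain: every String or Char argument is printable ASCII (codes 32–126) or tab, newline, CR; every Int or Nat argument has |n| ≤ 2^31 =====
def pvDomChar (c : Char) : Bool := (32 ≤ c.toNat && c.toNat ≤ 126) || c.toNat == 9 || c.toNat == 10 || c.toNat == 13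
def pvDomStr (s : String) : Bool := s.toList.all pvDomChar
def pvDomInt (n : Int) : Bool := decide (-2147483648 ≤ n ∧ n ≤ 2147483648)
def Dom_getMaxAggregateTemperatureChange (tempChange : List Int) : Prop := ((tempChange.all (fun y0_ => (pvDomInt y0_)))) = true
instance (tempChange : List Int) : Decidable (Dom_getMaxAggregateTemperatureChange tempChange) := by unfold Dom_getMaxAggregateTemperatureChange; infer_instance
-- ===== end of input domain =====

-- B replaces A's two auxiliary prefix/suffix arrays and three loops by a single forward pass
-- keeping three scalars (constant extra space instead of O(n)); return values agree on every
-- nonempty list (both Pythons raise IndexError on [], excluded by Pre_).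

-- ===== PORT A =====
def pvPrefStep (tempChange : List Int) (ps : List Int) (i : Int) : List Int :=
  PySem.List.pySetD ps i (PySem.List.pyGetD ps (i - 1) 0 + PySem.List.pyGetD tempChange i 0)

def pvSufStep (tempChange : List Int) (ss : List Int) (i : Int) : List Int :=
  PySem.List.pySetD ss i (PySem.List.pyGetD ss (i + 1) 0 + PySem.List.pyGetD tempChange i 0)

-- float('-inf') seed is modelled exactly by `none`; with n ≥ 1 the fold always returns `some`.
def pvMaxStep (prefixSums suffixSums : List Int) (acc : Option Int) (i : Int) : Option Int :=
  let maxChange := max (PySem.List.pyGetD prefixSums i 0) (PySem.List.pyGetD suffixSums i 0)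
  some (match acc with | none => maxChange | some a => max a maxChange)

def getMaxAggregateTemperatureChange (tempChange : List Int) : Int :=
  let n : Int := PySem.List.len tempChange
  let prefixSums : List Int := List.replicate tempChange.length 0
  let suffixSums : List Int := List.replicate tempChange.length 0
  let prefixSums := PySem.List.pySetD prefixSums 0 (PySem.List.pyGetD tempChange 0 0)
  let prefixSums := (PySem.List.pyRange 1 n 1).foldl (pvPrefStep tempChange) prefixSums
  let suffixSums := PySem.List.pySetD suffixSums (n - 1) (PySem.List.pyGetD tempChange (n - 1) 0)
  let suffixSums := (PySem.List.pyRange (n - 2) (-1) (-1)).foldl (pvSufStep tempChange) suffixSums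
  let maxAggregateChange := (PySem.List.pyRange 0 n 1).foldl (pvMaxStep prefixSums suffixSums) none
  maxAggregateChange.getD 0

-- ===== PORT B =====
def pvAltStep (st : Int × Int × Int) (x : Int) : Int × Int × Int :=
  let minPrev := if st.1 < st.2.2 then st.1 else st.2.2
  let total := st.1 + x
  let maxPrefix := if total > st.2.1 then total else st.2.1
  (total, maxPrefix, minPrev)

def getMaxAggregateTemperatureChange_alt (tempChange : List Int) : Int :=
  let t0 := tempChange.getD 0 0      -- tempChange[0]; Pre_ guarantees nonempty
  let st := (PySem.List.slice tempChange (some 1) none).foldl pvAltStep (t0, t0, 0)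
  max st.2.1 (st.1 - st.2.2)

-- ===== PRECONDITION & SPEC =====
-- Both Pythons raise IndexError on the empty list (tempChange[0]); Pre_ excludes exactly that.
def Pre_getMaxAggregateTemperatureChange (tempChange : List Int) : Prop := tempChange ≠ []
instance (tempChange : List Int) : Decidable (Pre_getMaxAggregateTemperatureChange tempChange) := by
  unfold Pre_getMaxAggregateTemperatureChange; infer_instance
def pvWitness_getMaxAggregateTemperatureChange : List Int := [2, -5, 3, 1]

def Spec_getMaxAggregateTemperatureChange (tempChange : List Int) (out : Int) : Prop :=
  out = getMaxAggregateTemperatureChange_alt tempChange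
instance (tempChange : List Int) (out : Int) : Decidable (Spec_getMaxAggregateTemperatureChange tempChange out) := by
  unfold Spec_getMaxAggregateTemperatureChange; infer_instance

-- ===== CLAIM (what is proved, stated in full; the proofs are below) =====
def Claim_equal_getMaxAggregateTemperatureChange : Prop := ∀ (tempChange : List Int), Dom_getMaxAggregateTemperatureChange tempChange → Pre_getMaxAggregateTemperatureChange tempChange → Spec_getMaxAggregateTemperatureChange tempChange (getMaxAggregateTemperatureChange tempChange)

-- ===== LEMMAS AND PROOFS =====

-- proof-side reference functions
def pvListMax : List Int → Int
  | [] => 0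
  | x :: l => l.foldl max x

def pvRunMax : Int → List Int → Int
  | c, [] => c
  | c, x :: l => max c (pvRunMax (c + x) l)

def pvRunMin : Int → List Int → Int
  | c, [] => c
  | c, x :: l => min c (pvRunMin (c + x) l)

def pvScan : Int → List Int → List Int
  | c, [] => [c]
  | c, x :: l => c :: pvScan (c + x) l

def pvSufL : List Int → List Int
  | [] => []
  | [a] => [a]
  | a :: b :: l => (a + (b :: l).sum) :: pvSufL (b :: l)

theorem pv_foldl_max_max (l : List Int) : ∀ a b : Int, l.foldl max (max a b) = max a (l.foldl max b) := by
  induction l with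
  | nil => intro a b; rfl
  | cons x l ih =>
    intro a b
    simp only [List.foldl_cons]
    rw [max_assoc, ih]

theorem pvListMax_cons (c : Int) (l : List Int) (h : l ≠ []) :
    pvListMax (c :: l) = max c (pvListMax l) := by
  cases l with
  | nil => exact absurd rfl h
  | cons y m =>
    simp only [pvListMax, List.foldl_cons]
    have := pv_foldl_max_max m c y
    simpa using this

theorem pvRunMax_eq (c : Int) (l : List Int) : pvRunMax c l = pvListMax (pvScan c l) := by
  induction l generalizing c with
  | nil => rfl
  | cons x l ih =>
    have hne : pvScan (c + x) l ≠ [] := by cases l <;> simp [pvScan]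
    simp only [pvRunMax, pvScan, pvListMax_cons c _ hne, ih]

theorem pv_le_runMax (c : Int) (l : List Int) : c ≤ pvRunMax c l := by
  cases l <;> simp [pvRunMax]

theorem pvRunMin_shift (d : Int) (l : List Int) : ∀ c, pvRunMin (d + c) l = d + pvRunMin c l := by
  induction l with
  | nil => intro c; rfl
  | cons x l ih =>
    intro c
    simp only [pvRunMin]
    rw [add_assoc, ih]
    omega

-- pvSufL basics
theorem pvSufL_length (t : List Int) : (pvSufL t).length = t.length := by
  induction t with
  | nil => rfl
  | cons a t ih => cases t <;> simp_all [pvSufL]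

theorem pvSufL_getElem (t : List Int) : ∀ (k : Nat) (h : k < (pvSufL t).length),
    (pvSufL t)[k] = (t.drop k).sum := by
  induction t with
  | nil => intro k h; simp [pvSufL] at h
  | cons a t ih =>
    intro k h
    cases t with
    | nil =>
      simp [pvSufL] at h
      subst h
      simp [pvSufL]
    | cons b m =>
      cases k with
      | zero => simp [pvSufL]
      | succ k =>
        simp only [pvSufL] at h ⊢
        simp only [List.getElem_cons_succ, List.drop_succ_cons]
        exact ih k (by simpa [pvSufL] using h)

theorem pvScan_length (c : Int) (l : List Int) : (pvScan c l).length = l.length + 1 := by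
  induction l generalizing c with
  | nil => rfl
  | cons x l ih => simp [pvScan, ih]

theorem pvScan_getElem (l : List Int) : ∀ (c : Int) (k : Nat) (h : k < (pvScan c l).length),
    (pvScan c l)[k] = c + (l.take k).sum := by
  induction l with
  | nil =>
    intro c k h
    simp [pvScan] at h
    subst h; simp [pvScan]
  | cons x l ih =>
    intro c k h
    cases k with
    | zero => simp [pvScan]
    | succ k =>
      simp only [pvScan, List.getElem_cons_succ, List.take_succ_cons, List.sum_cons]
      rw [ih (c + x) k (by simpa [pvScan_length] using (by simpa [pvScan, pvScan_length] using h))]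
      ring

theorem pvSuf_eq_sum_sub_runMin (x : Int) (xs : List Int) :
    pvListMax (pvSufL (x :: xs)) = (x :: xs).sum - pvRunMin 0 ((x :: xs).dropLast) := by
  induction xs generalizing x with
  | nil => simp [pvSufL, pvListMax, pvRunMin]
  | cons b m ih =>
    have hne : pvSufL (b :: m) ≠ [] := by
      have := pvSufL_length (b :: m); intro h; rw [h] at this; simp at this
    rw [show pvSufL (x :: b :: m) = (x + (b :: m).sum) :: pvSufL (b :: m) from rfl,
        pvListMax_cons _ _ hne, ih b]
    have hd : (x :: b :: m).dropLast = x :: (b :: m).dropLast := by simp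
    rw [hd]
    have : pvRunMin 0 (x :: (b :: m).dropLast) = min 0 (x + pvRunMin 0 ((b :: m).dropLast)) := by
      simp only [pvRunMin]
      rw [show (0 : Int) + x = x + 0 by ring, pvRunMin_shift]
    rw [this]
    simp only [List.sum_cons]
    omega

-- split max over a pointwise max of two maps
theorem pvListMax_map_max (l : List Nat) (f g : Nat → Int) (h : l ≠ []) :
    pvListMax (l.map fun k => max (f k) (g k)) = max (pvListMax (l.map f)) (pvListMax (l.map g)) := by
  induction l with
  | nil => exact absurd rfl h
  | cons k l ih =>
    cases l with
    | nil => simp [pvListMax]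
    | cons k2 l2 =>
      have hne : (k2 :: l2 : List Nat) ≠ [] := by simp
      have h1 : ((k :: k2 :: l2).map fun j => max (f j) (g j)) =
          (max (f k) (g k)) :: ((k2 :: l2).map fun j => max (f j) (g j)) := rfl
      rw [h1, pvListMax_cons _ _ (by simp), ih hne]
      rw [show (k :: k2 :: l2).map f = f k :: (k2 :: l2).map f from rfl,
          pvListMax_cons _ _ (by simp),
          show (k :: k2 :: l2).map g = g k :: (k2 :: l2).map g from rfl,
          pvListMax_cons _ _ (by simp)]
      omega

-- option-max fold (float('-inf') seed) over a nonempty list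
theorem pv_optfold_some (g : Nat → Int) (l : List Nat) : ∀ a : Int,
    l.foldl (fun acc k => some (match acc with | none => g k | some a => max a (g k))) (some a)
      = some (l.foldl (fun a k => max a (g k)) a) := by
  induction l with
  | nil => intro a; rfl
  | cons k l ih => intro a; simp only [List.foldl_cons]; exact ih _

theorem pv_optfold (g : Nat → Int) (l : List Nat) (h : l ≠ []) :
    l.foldl (fun acc k => some (match acc with | none => g k | some a => max a (g k))) none
      = some (pvListMax (l.map g)) := by
  cases l with
  | nil => exact absurd rfl h
  | cons k l =>
    simp only [List.foldl_cons]
    rw [pv_optfold_some]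
    simp [pvListMax, List.foldl_map]

-- ===== A-side: the two array-building folds =====

def pvMaskP (t : List Int) (m : Nat) : List Int :=
  (List.range t.length).map (fun k => if k < m then ((t.take (k + 1)).sum) else 0)

def pvMaskS (t : List Int) (m : Int) : List Int :=
  (List.range t.length).map (fun (k : Nat) => if m < (k : Int) then ((t.drop k).sum) else 0)

theorem pvMaskP_set (t : List Int) (m : Nat) (_hm : m < t.length) :
    (pvMaskP t m).set m ((t.take (m + 1)).sum) = pvMaskP t (m + 1) := by
  apply List.ext_getElem
  · simp [pvMaskP]
  · intro k h1 h2
    simp only [pvMaskP, List.length_set, List.length_map, List.length_range] at h1 h2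
    simp only [pvMaskP, List.getElem_set, List.getElem_map, List.getElem_range]
    by_cases hk : m = k
    · subst hk; simp
    · rw [if_neg hk]
      by_cases hlt : k < m
      · rw [if_pos hlt, if_pos (by omega)]
      · rw [if_neg hlt, if_neg (by omega)]

theorem pvPrefFold (t : List Int) : ∀ (fuel m : Nat), 1 ≤ m → m + fuel = t.length →
    (PySem.List.pyRange (m : Int) (t.length : Int) 1).foldl (pvPrefStep t) (pvMaskP t m)
      = pvMaskP t t.length := by
  intro fuel
  induction fuel with
  | zero =>
    intro m h1 h2
    have hm : m = t.length := by omega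
    subst hm
    rw [PySem.List.pyRange_one_eq_nil (le_refl _)]
    rfl
  | succ fuel ih =>
    intro m h1 h2
    have hmn : (m : Int) < (t.length : Int) := by exact_mod_cast (by omega : m < t.length)
    rw [PySem.List.pyRange_one_cons hmn, List.foldl_cons]
    have hstep : pvPrefStep t (pvMaskP t m) (m : Int) = pvMaskP t (m + 1) := by
      unfold pvPrefStep
      have hc : ((m : Int) - 1) = ((m - 1 : Nat) : Int) := by omega
      rw [hc, PySem.List.pyGetD_natCast, PySem.List.pyGetD_natCast]
      rw [List.getD_eq_getElem (pvMaskP t m) 0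
            (by simp only [pvMaskP, List.length_map, List.length_range]; omega),
          List.getD_eq_getElem t 0 (by omega : m < t.length)]
      simp only [pvMaskP, List.getElem_map, List.getElem_range]
      rw [if_pos (by omega : m - 1 < m)]
      have hsum : (t.take (m - 1 + 1)).sum + t[m] = (t.take (m + 1)).sum := by
        have := List.sum_take_succ t m (by omega)
        rw [this, show m - 1 + 1 = m by omega]
      rw [hsum]
      rw [PySem.List.pySetD_natCast]
      exact pvMaskP_set t m (by omega)
    rw [hstep]
    have := ih (m + 1) (by omega) (by omega)
    rw [show ((m : Int) + 1) = ((m + 1 : Nat) : Int) by push_cast; ring]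
    exact this

theorem pvMaskS_set (t : List Int) (m : Int) (hm0 : 0 ≤ m) (_hm : m < (t.length : Int)) :
    (pvMaskS t m).set m.toNat ((t.drop m.toNat).sum) = pvMaskS t (m - 1) := by
  apply List.ext_getElem
  · simp [pvMaskS]
  · intro k h1 h2
    simp only [pvMaskS, List.length_set, List.length_map, List.length_range] at h1 h2
    simp only [pvMaskS, List.getElem_set, List.getElem_map, List.getElem_range]
    by_cases hk : m.toNat = k
    · subst hk; rw [if_pos rfl, if_pos (by omega)]
    · rw [if_neg hk]
      by_cases hlt : m < (k : Int)
      · rw [if_pos hlt, if_pos (by omega)]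
      · rw [if_neg hlt, if_neg (by omega)]

theorem pvSufFold (t : List Int) : ∀ (fuel : Nat) (m : Int), -1 ≤ m → m ≤ (t.length : Int) - 2 →
    m + 1 = (fuel : Int) →
    (PySem.List.pyRange m (-1) (-1)).foldl (pvSufStep t) (pvMaskS t m) = pvMaskS t (-1) := by
  intro fuel
  induction fuel with
  | zero =>
    intro m h1 h2 h3
    have hm : m = -1 := by omega
    subst hm
    rw [PySem.List.pyRange_neg_one_eq_nil (le_refl _)]
    rfl
  | succ fuel ih =>
    intro m h1 h2 h3
    have hm0 : 0 ≤ m := by omega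
    rw [PySem.List.pyRange_neg_one_cons (by omega : (-1 : Int) < m), List.foldl_cons]
    have hstep : pvSufStep t (pvMaskS t m) m = pvMaskS t (m - 1) := by
      unfold pvSufStep
      rw [PySem.List.pyGetD_eq_getElem (pvMaskS t m) 0 (by omega)
            (by simp only [pvMaskS, List.length_map, List.length_range]; omega),
          PySem.List.pyGetD_eq_getElem t 0 hm0 (by omega)]
      simp only [pvMaskS, List.getElem_map, List.getElem_range]
      rw [if_pos (by omega : m < (((m + 1).toNat : Nat) : Int))]
      have hdrop : (t.drop (m + 1).toNat).sum + t[m.toNat] = (t.drop m.toNat).sum := by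
        have hlt : m.toNat < t.length := by omega
        rw [List.drop_eq_getElem_cons hlt, List.sum_cons,
            show m.toNat + 1 = (m + 1).toNat by omega]
        ring
      rw [hdrop, PySem.List.pySetD_of_nonneg _ _ hm0]
      exact pvMaskS_set t m hm0 (by omega)
    rw [hstep]
    exact ih (m - 1) (by omega) (by omega) (by omega)

-- ===== B-side: closed form of the fold =====
theorem pvAltFold (l : List Int) : ∀ (T M m : Int), T ≤ M →
    l.foldl pvAltStep (T, M, m)
      = (T + l.sum, max M (pvRunMax T l),
          if l.isEmpty then m else min m (pvRunMin T l.dropLast)) := by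
  induction l with
  | nil => intro T M m h; simp [pvRunMax]; omega
  | cons x l ih =>
    intro T M m h
    simp only [List.foldl_cons]
    have hstep : pvAltStep (T, M, m) x
        = (T + x, max M (T + x), min m T) := by
      simp [pvAltStep]; constructor <;> omega
    rw [hstep, ih (T + x) (max M (T + x)) (min m T) (le_max_right _ _)]
    cases l with
    | nil => simp [pvRunMax, pvRunMin]; omega
    | cons y l2 =>
      simp only [List.isEmpty_cons, List.sum_cons, pvRunMax, Bool.false_eq_true, if_false,
        Prod.mk.injEq]
      refine ⟨by ring, by omega, ?_⟩
      have hd : (x :: y :: l2).dropLast = x :: (y :: l2).dropLast := by simp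
      rw [hd]
      simp only [pvRunMin]
      omega

theorem pvMaskP_full (t : List Int) :
    pvMaskP t t.length = (List.range t.length).map (fun k => (t.take (k + 1)).sum) := by
  unfold pvMaskP
  apply List.map_congr_left
  intro k hk
  rw [if_pos (List.mem_range.mp hk)]

theorem pvMaskS_full (t : List Int) :
    pvMaskS t (-1) = (List.range t.length).map (fun k => (t.drop k).sum) := by
  unfold pvMaskS
  apply List.map_congr_left
  intro k hk
  rw [if_pos (by omega : (-1 : Int) < (k : Int))]

theorem pvPrefInit (x : Int) (xs : List Int) :
    PySem.List.pySetD (List.replicate (x :: xs).length 0) 0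
        (PySem.List.pyGetD (x :: xs) 0 0) = pvMaskP (x :: xs) 1 := by
  rw [PySem.List.pyGetD_zero_cons, PySem.List.pySetD_of_nonneg _ _ (by omega : (0:Int) ≤ 0)]
  apply List.ext_getElem
  · simp [pvMaskP]
  · intro k h1 h2
    simp only [pvMaskP, List.getElem_set, List.getElem_map, List.getElem_range,
      List.getElem_replicate, List.length_set, List.length_replicate] at h1 ⊢
    by_cases hk : k = 0
    · subst hk; simp
    · rw [if_neg (by omega), if_neg (by omega)]

theorem pvSufInit (t : List Int) (h : t ≠ []) :
    PySem.List.pySetD (List.replicate t.length 0) ((t.length : Int) - 1)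
        (PySem.List.pyGetD t ((t.length : Int) - 1) 0) = pvMaskS t ((t.length : Int) - 2) := by
  have hlen : 1 ≤ t.length := List.length_pos_iff.mpr h
  rw [PySem.List.pyGetD_eq_getElem t 0 (by omega) (by omega),
      PySem.List.pySetD_of_nonneg _ _ (by omega : (0:Int) ≤ (t.length : Int) - 1)]
  apply List.ext_getElem
  · simp [pvMaskS]
  · intro k h1 h2
    simp only [List.length_set, List.length_replicate] at h1
    simp only [pvMaskS, List.getElem_set, List.getElem_map, List.getElem_range,
      List.getElem_replicate]
    by_cases hk : ((t.length : Int) - 1).toNat = k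
    · subst hk
      rw [if_pos rfl, if_pos (by omega)]
      have hdrop : t.drop ((t.length : Int) - 1).toNat = [t[((t.length : Int) - 1).toNat]] := by
        rw [List.drop_eq_getElem_cons (by omega)]
        rw [show ((t.length : Int) - 1).toNat + 1 = t.length by omega, List.drop_length]
      rw [hdrop, List.sum_cons, List.sum_nil, add_zero]
    · rw [if_neg hk, if_neg (by omega)]

theorem pvMapP_eq_scan (x : Int) (xs : List Int) :
    (List.range (x :: xs).length).map (fun k => ((x :: xs).take (k + 1)).sum) = pvScan x xs := by
  apply List.ext_getElem
  · simp [pvScan_length]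
  · intro k h1 h2
    rw [pvScan_getElem xs x k h2]
    simp only [List.getElem_map, List.getElem_range, List.take_succ_cons, List.sum_cons]

theorem pvMapS_eq_sufL (t : List Int) :
    (List.range t.length).map (fun k => (t.drop k).sum) = pvSufL t := by
  apply List.ext_getElem
  · simp [pvSufL_length]
  · intro k h1 h2
    rw [pvSufL_getElem t k h2]
    simp

theorem getMaxAggregateTemperatureChange_eval (x : Int) (xs : List Int) :
    getMaxAggregateTemperatureChange (x :: xs)
      = max (pvRunMax x xs) (pvListMax (pvSufL (x :: xs))) := by
  have hlen : 1 ≤ (x :: xs).length := by simp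
  unfold getMaxAggregateTemperatureChange
  simp only [PySem.List.len_eq]
  have hpf := pvPrefFold (x :: xs) ((x :: xs).length - 1) 1 (by omega) (by omega)
  push_cast at hpf
  have hsf := pvSufFold (x :: xs) ((x :: xs).length - 1) (((x :: xs).length : Int) - 2)
    (by omega) (by omega) (by omega)
  rw [pvPrefInit x xs, hpf, pvSufInit (x :: xs) (by simp), hsf]
  rw [pvMaskP_full, pvMaskS_full]
  -- the max-collecting loop
  rw [PySem.List.pyRange_zero_natCast, List.foldl_map]
  have hcongr := PySem.List.foldl_congr_mem (List.range (x :: xs).length)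
    (fun (acc : Option Int) (k : Nat) => pvMaxStep
        ((List.range (x :: xs).length).map (fun j => ((x :: xs).take (j + 1)).sum))
        ((List.range (x :: xs).length).map (fun j => ((x :: xs).drop j).sum)) acc (k : Int))
    (fun (acc : Option Int) (k : Nat) => some (match acc with
      | none => max (((x :: xs).take (k + 1)).sum) (((x :: xs).drop k).sum)
      | some a => max a (max (((x :: xs).take (k + 1)).sum) (((x :: xs).drop k).sum))))
    none
    (by
      intro acc k hk
      have hklt : k < (x :: xs).length := List.mem_range.mp hk
      simp only [pvMaxStep, PySem.List.pyGetD_natCast,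
        PySem.List.getD_map_range _ _ _ _ hklt])
  rw [hcongr]
  rw [pv_optfold _ _ (by simp)]
  simp only [Option.getD_some]
  rw [show (fun k => max (((x :: xs).take (k + 1)).sum) (((x :: xs).drop k).sum))
        = (fun k => max ((fun k => ((x :: xs).take (k + 1)).sum) k)
            ((fun k => ((x :: xs).drop k).sum) k)) from rfl]
  rw [pvListMax_map_max _ _ _ (by simp)]
  rw [pvMapP_eq_scan, pvMapS_eq_sufL, pvRunMax_eq]

theorem getMaxAggregateTemperatureChange_alt_eval (x : Int) (xs : List Int) :
    getMaxAggregateTemperatureChange_alt (x :: xs)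
      = max (pvRunMax x xs) (pvListMax (pvSufL (x :: xs))) := by
  have hB : getMaxAggregateTemperatureChange_alt (x :: xs)
      = (let st := xs.foldl pvAltStep (x, x, 0); max st.2.1 (st.1 - st.2.2)) := by
    simp [getMaxAggregateTemperatureChange_alt, PySem.List.slice_from_one]
  rw [hB, pvAltFold xs x x 0 le_rfl]
  cases xs with
  | nil => simp [pvRunMax, pvSufL, pvListMax]
  | cons y l =>
    simp only [List.isEmpty_cons]
    rw [pvSuf_eq_sum_sub_runMin]
    have hd : (x :: y :: l).dropLast = x :: (y :: l).dropLast := by simp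
    rw [hd]
    have hshift : pvRunMin 0 (x :: (y :: l).dropLast) = min 0 (x + pvRunMin 0 ((y :: l).dropLast)) := by
      simp only [pvRunMin]
      rw [show (0 : Int) + x = x + 0 by ring, pvRunMin_shift]
    rw [hshift]
    have hmax : max x (pvRunMax x (y :: l)) = pvRunMax x (y :: l) :=
      max_eq_right (pv_le_runMax x _)
    simp only [Bool.false_eq_true, if_false, List.sum_cons]
    rw [hmax]
    have hmin : pvRunMin x ((y :: l).dropLast) = x + pvRunMin 0 ((y :: l).dropLast) := by
      rw [show x = x + 0 by ring, pvRunMin_shift]; ring_nf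
    rw [hmin]

-- ===== VERDICT (by name: the statement is the Claim_ definition above) =====
theorem getMaxAggregateTemperatureChange_spec : Claim_equal_getMaxAggregateTemperatureChange := by
  intro t _ hpre
  unfold Spec_getMaxAggregateTemperatureChange
  cases t with
  | nil => exact absurd rfl hpre
  | cons x xs =>
    exact (getMaxAggregateTemperatureChange_eval x xs).trans
      (getMaxAggregateTemperatureChange_alt_eval x xs).symm
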